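-- pv_equiv track=rewrite | github.com/DICKY1987/Gov_Reg | 01260207201000001250_REGISTRY/01260207201000001313_capability_mapping_system/01260207220000001318_mapp_py/P_01260202173939000086_similarity_clusterer.py | cluster_by_hash
-- ===== SOURCE A (Python) =====
-- from typing import Dict, List, Iterable, Any
-- from collections import defaultdict
--
-- def cluster_by_hash(records: Iterable[dict]) -> Dict[str, List[str]]:
--     """
--     Cluster files by deliverable signature hash.
--
--     Args:
--         records: Iterable of dicts with 'file_id' and 'py_deliverable_signature_hash'
--
--     Returns:
--         Dict mapping cluster_key → list of file_ids
--     """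
--     clusters = defaultdict(list)
--
--     for record in records:
--         file_id = record.get('file_id')
--         sig_hash = record.get('py_deliverable_signature_hash')
--
--         if not file_id:
--             continue
--
--         if sig_hash:
--             # Group by signature hash (exact match)
--             clusters[sig_hash].append(file_id)
--         else:
--             # Singleton cluster for files without signature
--             singleton_key = f"SINGLETON_{file_id}"
--             clusters[singleton_key].append(file_id)
--
--     return dict(clusters)
-- ===== SOURCE B (Python) =====
-- def _pair(record):
--     """One (cluster_key, file_id) pair for a record, or nothing for falsy file_id."""
--     file_id = record.get('file_id')
--     if not file_id:
--         return []
--     sig_hash = record.get('py_deliverable_signature_hash')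
--     return [(sig_hash if sig_hash else f"SINGLETON_{file_id}", file_id)]
--
-- def cluster_by_hash(records):
--     pairs = [p for record in records for p in _pair(record)]
--     keys = list(dict.fromkeys(k for k, _ in pairs))
--     return {k: [f for k2, f in pairs if k2 == k] for k in keys}
-- ===== Notes on version B (the rewrite author's own statement) =====
-- stated objective: alternative
-- what changed: Replaces the single accumulate-into-defaultdict pass with a flatten-to-(key,file_id)-pairs pass followed by an ordered key dedup and a per-key grouping comprehension.
import Mathlib
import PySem

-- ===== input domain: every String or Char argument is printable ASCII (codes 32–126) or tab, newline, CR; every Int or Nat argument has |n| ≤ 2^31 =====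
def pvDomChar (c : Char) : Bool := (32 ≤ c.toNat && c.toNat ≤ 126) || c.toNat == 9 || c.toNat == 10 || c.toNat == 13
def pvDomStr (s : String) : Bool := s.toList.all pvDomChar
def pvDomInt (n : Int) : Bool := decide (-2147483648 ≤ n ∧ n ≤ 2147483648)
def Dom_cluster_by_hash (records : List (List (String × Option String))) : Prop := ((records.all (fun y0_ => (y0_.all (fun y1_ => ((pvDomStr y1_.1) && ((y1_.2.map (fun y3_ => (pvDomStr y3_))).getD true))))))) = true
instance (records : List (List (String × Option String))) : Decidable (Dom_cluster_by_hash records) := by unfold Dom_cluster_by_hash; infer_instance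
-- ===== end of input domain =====

-- B replaces A's accumulate-into-defaultdict pass by a flatten-to-pairs pass, an ordered key dedup,
-- and a per-key grouping scan (alternative decomposition, same results).


-- ===== PORT A =====
-- record.get(k): first match in the association list, None when absent (exact for Python dict.get)
def pvGet (record : List (String × Option String)) (k : String) : Option String :=
  ((PySem.Dict.mk record).get? k).getD none

def cluster_by_hash (records : List (List (String × Option String))) : List (String × List String) :=
  (records.foldl (fun (clusters : PySem.Dict String (List String)) record =>
      let file_id := pvGet record "file_id"
      let sig_hash := pvGet record "py_deliverable_signature_hash"
      match file_id with
      | none => clusters                       -- if not file_id: continue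
      | some f =>
        if f = "" then clusters                -- if not file_id: continue
        else
          match sig_hash with
          | some s =>
            if s = "" then clusters.modify ("SINGLETON_" ++ f) [] (· ++ [f])
            else clusters.modify s [] (· ++ [f])
          | none => clusters.modify ("SINGLETON_" ++ f) [] (· ++ [f]))
    PySem.Dict.empty).items

-- ===== PORT B =====
-- _pair(record) from Source B
def pvPair (record : List (String × Option String)) : List (String × String) :=
  match pvGet record "file_id" with
  | none => []
  | some f =>
    if f = "" then []
    else
      match pvGet record "py_deliverable_signature_hash" with
      | some s => if s = "" then [("SINGLETON_" ++ f, f)] else [(s, f)]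
      | none => [("SINGLETON_" ++ f, f)]

def cluster_by_hash_alt (records : List (List (String × Option String))) : List (String × List String) :=
  let pairs := records.flatMap pvPair
  let keys := PySem.List.dedup (pairs.map Prod.fst)
  keys.map (fun k => (k, (pairs.filter (fun p => p.1 == k)).map Prod.snd))

-- ===== PRECONDITION & SPEC =====
def Spec_cluster_by_hash (records : List (List (String × Option String))) (out : List (String × List String)) : Prop := out = cluster_by_hash_alt records
instance (records : List (List (String × Option String))) (out : List (String × List String)) : Decidable (Spec_cluster_by_hash records out) := by unfold Spec_cluster_by_hash; infer_instance

-- ===== CLAIM (what is proved, stated in full; the proofs are below) =====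
def Claim_equal_cluster_by_hash : Prop := ∀ (records : List (List (String × Option String))), Dom_cluster_by_hash records → Spec_cluster_by_hash records (cluster_by_hash records)

-- ===== LEMMAS AND PROOFS =====

-- A's per-record step is the modify-fold of the record's pair list
lemma stepA_eq_foldl_pair (d : PySem.Dict String (List String)) (record : List (String × Option String)) :
    (let file_id := pvGet record "file_id"
     let sig_hash := pvGet record "py_deliverable_signature_hash"
     match file_id with
     | none => d
     | some f =>
       if f = "" then d
       else
         match sig_hash with
         | some s =>
           if s = "" then d.modify ("SINGLETON_" ++ f) [] (· ++ [f])
           else d.modify s [] (· ++ [f])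
         | none => d.modify ("SINGLETON_" ++ f) [] (· ++ [f]))
    = (pvPair record).foldl (fun d p => d.modify p.1 [] (· ++ [p.2])) d := by
  unfold pvPair
  cases pvGet record "file_id" with
  | none => rfl
  | some f =>
    by_cases hf : f = "" <;> simp only [hf, if_true, if_false] <;>
      first
      | rfl
      | (cases pvGet record "py_deliverable_signature_hash" with
         | none => rfl
         | some s => by_cases hs : s = "" <;> simp [hs])

lemma foldA_eq_foldl_pairs (records : List (List (String × Option String)))
    (d : PySem.Dict String (List String)) :
    records.foldl (fun (clusters : PySem.Dict String (List String)) record =>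
      let file_id := pvGet record "file_id"
      let sig_hash := pvGet record "py_deliverable_signature_hash"
      match file_id with
      | none => clusters
      | some f =>
        if f = "" then clusters
        else
          match sig_hash with
          | some s =>
            if s = "" then clusters.modify ("SINGLETON_" ++ f) [] (· ++ [f])
            else clusters.modify s [] (· ++ [f])
          | none => clusters.modify ("SINGLETON_" ++ f) [] (· ++ [f])) d
    = (records.flatMap pvPair).foldl (fun d p => d.modify p.1 [] (· ++ [p.2])) d := by
  induction records generalizing d with
  | nil => rfl
  | cons r rs ih =>
    simp only [List.foldl_cons, List.flatMap_cons, List.foldl_append]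
    rw [stepA_eq_foldl_pair d r] at *
    exact ih _

-- the modify-fold of a pair list, as items, is B's grouped list
lemma items_foldl_modify (pairs : List (String × String)) :
    ((pairs.foldl (fun (d : PySem.Dict String (List String)) p => d.modify p.1 [] (· ++ [p.2]))
        PySem.Dict.empty).items)
    = (PySem.List.dedup (pairs.map Prod.fst)).map
        (fun k => (k, (pairs.filter (fun p => p.1 == k)).map Prod.snd)) := by
  have hnd : (pairs.foldl (fun (d : PySem.Dict String (List String)) p => d.modify p.1 [] (· ++ [p.2]))
      PySem.Dict.empty).keys.Nodup := by
    exact PySem.Dict.nodup_keys_foldl_modify_key pairs Prod.fst [] (fun d p => (· ++ [p.2]))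
      PySem.Dict.empty PySem.Dict.nodup_keys_empty
  rw [PySem.Dict.items_eq_map_keys _ hnd []]
  rw [PySem.Dict.keys_foldl_modify_key]
  rw [PySem.Dict.keys_empty, PySem.Set.update_nil_left, ← PySem.List.dedup_eq_ofList]
  apply List.map_congr_left
  intro k _
  rw [PySem.Dict.getD_foldl_modify_append, PySem.Dict.getD_empty, List.nil_append]

-- ===== VERDICT (by name: the statement is the Claim_ definition above) =====
theorem cluster_by_hash_spec : Claim_equal_cluster_by_hash := by
  intro records _
  unfold Spec_cluster_by_hash cluster_by_hash cluster_by_hash_alt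
  rw [foldA_eq_foldl_pairs, items_foldl_modify]
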